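-- pv_equiv track=rewrite | github.com/codybuell/advent-of-code | 2020/day-17.py | grow_hyper_matrix
-- ===== SOURCE A (Python) =====
-- import copy
--
-- def grow_hyper_matrix(matrix):
--     # grow x and y dimiensions on all z and w
--     for w in matrix:
--         for z in w:
--             for y in z:
--                 y.insert(0,'.')
--                 y.append('.')
--             blank = [x.replace('#','.') for x in z[0].copy()]
--             z.insert(0, blank)
--             z.append(blank.copy())
--
--     # make a fresh z layer
--     layer = copy.deepcopy(matrix[0][0])
--     for idxy, y in enumerate(layer):
--         layer[idxy] = [x.replace('#','.') for x in y]
--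
--     # grow z on all w
--     for w in matrix:
--         w.insert(0, copy.deepcopy(layer))
--         w.append(copy.deepcopy(layer))
--
--     # grow in z
--     zslice = copy.deepcopy(matrix[0])
--     for idxz, z in enumerate(zslice):
--         for idxy, y in enumerate(z):
--             zslice[idxz][idxy] = [x.replace('#','.') for x in y]
--     matrix.insert(0, zslice)
--     matrix.append(copy.deepcopy(zslice))
--
--     return matrix
-- ===== SOURCE B (Python) =====
-- def grow_hyper_matrix(matrix):
--     # Index-driven rebuild: one pass over the OUTPUT coordinates. Each border
--     # plane/row is computed directly from a clamped source lookup ('#' cleaned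
--     # to '.'), instead of A's three staged insert/append passes with deepcopies.
--     # Mutates the argument in place via matrix[:] like A and returns it.
--     W = len(matrix)
--
--     def row(r, dirty):
--         body = [s.replace('#', '.') for s in r] if dirty else list(r)
--         return ['.'] + body + ['.']
--
--     out = []
--     for w in range(W + 2):
--         wbody = 1 <= w <= W
--         Z = len(matrix[w - 1]) if wbody else len(matrix[0])
--         cube = []
--         for z in range(Z + 2):
--             zbody = 1 <= z <= Z
--             if wbody and zbody:
--                 plane = matrix[w - 1][z - 1]
--             elif zbody:
--                 plane = matrix[0][z - 1]
--             else:
--                 plane = matrix[0][0]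
--             rows = []
--             for y in range(len(plane) + 2):
--                 ybody = 1 <= y <= len(plane)
--                 src = plane[y - 1] if ybody else plane[0]
--                 rows.append(row(src, not (wbody and zbody and ybody)))
--             cube.append(rows)
--         out.append(cube)
--     matrix[:] = out
--     return matrix
-- ===== Notes on version B (the rewrite author's own statement) =====
-- stated objective: alternative
-- what changed: Replaces A's three staged in-place insert/append mutation passes (with deepcopies of layers/slices) by a single index-driven pass over the output coordinates, computing every cell/row of the grown grid directly from a clamped, '#'-cleaned source lookup, then assigning back via matrix[:] to keep the in-place semantics.
import Mathlib
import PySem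

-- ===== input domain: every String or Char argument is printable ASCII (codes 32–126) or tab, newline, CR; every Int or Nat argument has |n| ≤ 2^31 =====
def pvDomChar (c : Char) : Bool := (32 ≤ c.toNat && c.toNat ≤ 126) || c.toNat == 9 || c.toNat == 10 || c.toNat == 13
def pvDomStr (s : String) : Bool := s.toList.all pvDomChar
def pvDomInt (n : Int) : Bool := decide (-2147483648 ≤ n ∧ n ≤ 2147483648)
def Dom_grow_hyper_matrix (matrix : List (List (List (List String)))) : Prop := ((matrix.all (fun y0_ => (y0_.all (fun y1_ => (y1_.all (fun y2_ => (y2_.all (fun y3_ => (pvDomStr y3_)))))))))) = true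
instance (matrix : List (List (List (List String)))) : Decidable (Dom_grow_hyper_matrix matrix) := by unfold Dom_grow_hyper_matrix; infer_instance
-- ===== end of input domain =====

-- ===== PORT A =====
-- B replaces A's three staged in-place insert/append passes (with deepcopies) by a single
-- index-driven pass over the output coordinates, each border computed from a clamped source
-- lookup; objective: alternative. Python A and B both mutate the argument in place
-- (B via matrix[:] = ...); the theorems are about the returned value, which equals the
-- mutated argument in both.

-- row with every '#' turned into '.', as in A's list comprehensions
def pvCleanRow_A (row : List String) : List String :=
  row.map (fun x => PySem.Str.replace x "#" ".")

-- A's first pass on one z plane: grow every y row, then insert/append the blank row.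
-- z[0] on an empty z raises IndexError in Python; headD [] is unreachable under Pre_.
def pvGrowXY_A (z : List (List String)) : List (List String) :=
  let z1 := z.map (fun y => ["."] ++ y ++ ["."])
  let blank := pvCleanRow_A (z1.headD [])
  [blank] ++ z1 ++ [blank]

def grow_hyper_matrix (matrix : List (List (List (List String)))) : List (List (List (List String))) :=
  -- grow x and y dimensions on all z and w (in-place mutation of each z → map)
  let m1 := matrix.map (fun w => w.map pvGrowXY_A)
  -- make a fresh z layer from matrix[0][0] (raises on empty matrix/matrix[0]; headD unreachable under Pre_)
  let layer := ((m1.headD []).headD []).map pvCleanRow_A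
  -- grow z on all w
  let m2 := m1.map (fun w => [layer] ++ w ++ [layer])
  -- grow in w: zslice from matrix[0], cleaned cell by cell
  let zslice := (m2.headD []).map (fun z => z.map pvCleanRow_A)
  [zslice] ++ m2 ++ [zslice]

-- ===== PORT B =====
-- l[i]: Python raises IndexError out of range; under Pre_ every index below is in range,
-- so the .getD default is unreachable.
def pvAt {α : Type} (l : List α) (i : Int) (d : α) : α := (PySem.List.pyGet? l i).getD d

-- Source B's helper `row(r, dirty)`
def pvRowB (r : List String) (dirty : Bool) : List String :=
  let body := if dirty then r.map (fun s => PySem.Str.replace s "#" ".") else r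
  ["."] ++ body ++ ["."]

def grow_hyper_matrix_alt (matrix : List (List (List (List String)))) : List (List (List (List String))) :=
  let W : Int := matrix.length
  (PySem.List.pyRange 0 (W + 2) 1).map (fun w =>
    let wbody := decide (1 ≤ w ∧ w ≤ W)
    let Z : Int := if wbody then (pvAt matrix (w - 1) []).length else (pvAt matrix 0 []).length
    (PySem.List.pyRange 0 (Z + 2) 1).map (fun z =>
      let zbody := decide (1 ≤ z ∧ z ≤ Z)
      let plane :=
        if wbody && zbody then pvAt (pvAt matrix (w - 1) []) (z - 1) []
        else if zbody then pvAt (pvAt matrix 0 []) (z - 1) []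
        else pvAt (pvAt matrix 0 []) 0 []
      (PySem.List.pyRange 0 ((plane.length : Int) + 2) 1).map (fun y =>
        let ybody := decide (1 ≤ y ∧ y ≤ (plane.length : Int))
        let src := if ybody then pvAt plane (y - 1) [] else pvAt plane 0 []
        pvRowB src (!(wbody && zbody && ybody)))))

-- ===== PRECONDITION & SPEC =====
-- Pre_ excludes exactly the inputs on which Python A raises IndexError:
-- an empty matrix, an empty first w (matrix[0][0] / layer), or any empty z plane (z[0]).
def Pre_grow_hyper_matrix (matrix : List (List (List (List String)))) : Prop :=
  matrix ≠ [] ∧ matrix.headD [] ≠ [] ∧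
    (matrix.all (fun w => w.all (fun z => !z.isEmpty))) = true
instance (matrix : List (List (List (List String)))) : Decidable (Pre_grow_hyper_matrix matrix) := by
  unfold Pre_grow_hyper_matrix; infer_instance
def pvWitness_grow_hyper_matrix : List (List (List (List String))) := [[[["#"]]]]

def Spec_grow_hyper_matrix (matrix : List (List (List (List String)))) (out : List (List (List (List String)))) : Prop := out = grow_hyper_matrix_alt matrix
instance (matrix : List (List (List (List String)))) (out : List (List (List (List String)))) : Decidable (Spec_grow_hyper_matrix matrix out) := by unfold Spec_grow_hyper_matrix; infer_instance

-- ===== CLAIM (what is proved, stated in full; the proofs are below) =====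
def Claim_equal_grow_hyper_matrix : Prop := ∀ (matrix : List (List (List (List String)))), Dom_grow_hyper_matrix matrix → Pre_grow_hyper_matrix matrix → Spec_grow_hyper_matrix matrix (grow_hyper_matrix matrix)

-- ===== LEMMAS AND PROOFS =====

def pvCf (c : Char) : Char := if c = '#' then '.' else c

theorem pvReplaceGo_eq (l acc : List Char) (fuel : Nat) (h : l.length ≤ fuel) :
    PySem.Chars.replace.go ['#'] ['.'] fuel l acc = acc.reverse ++ l.map pvCf := by
  induction l generalizing acc fuel with
  | nil =>
    cases fuel <;> simp [PySem.Chars.replace.go]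
  | cons c t ih =>
    cases fuel with
    | zero => simp at h
    | succ f =>
      simp only [PySem.Chars.replace.go, List.isPrefixOf]
      by_cases hc : c = '#'
      · subst hc
        simp only [beq_self_eq_true, Bool.true_and, if_pos]
        rw [show List.drop ['#'].length ('#' :: t) = t from rfl, ih]
        · simp [pvCf]
        · simpa using Nat.le_of_succ_le_succ h
      · rw [if_neg, ih]
        · simp [pvCf, hc]
        · simpa using Nat.le_of_succ_le_succ h
        · simp; exact fun hh => (hc hh.symm).elim

theorem pvClean_eq (s : String) :
    PySem.Str.replace s "#" "." = String.ofList (s.toList.map pvCf) := by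
  show String.ofList (PySem.Chars.replace s.toList ['#'] ['.']) = _
  rw [PySem.Chars.replace, if_neg (by simp), pvReplaceGo_eq _ _ _ le_rfl]
  simp

theorem pvClean_idem (s : String) :
    PySem.Str.replace (PySem.Str.replace s "#" ".") "#" "." = PySem.Str.replace s "#" "." := by
  rw [pvClean_eq, pvClean_eq]
  congr 1
  simp only [String.toList_ofList, List.map_map]
  apply List.map_congr_left
  intro c _
  simp only [Function.comp, pvCf]
  split_ifs with h1 h2 <;> simp_all


theorem pvCleanRow_idem (r : List String) : pvCleanRow_A (pvCleanRow_A r) = pvCleanRow_A r := by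
  simp [pvCleanRow_A, List.map_map, Function.comp, pvClean_idem]

theorem pvRowB_true (r : List String) :
    pvRowB r true = pvCleanRow_A (["."] ++ r ++ ["."]) := by
  simp [pvRowB, pvCleanRow_A]
  decide

theorem pvRange_pad_map {β : Type} (n : Nat) (F : Int → β) :
    (PySem.List.pyRange 0 ((n : Int) + 2) 1).map F
      = F 0 :: ((List.range n).map (fun (i : Nat) => F ((i : Int) + 1)) ++ [F ((n : Int) + 1)]) := by
  rw [PySem.List.pyRange_one]
  have h2 : (((n : Int) + 2 - 0).toNat) = n + 2 := by omega
  rw [h2]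
  rw [show n + 2 = (n+1) + 1 from rfl, List.range_succ_eq_map, List.range_succ]
  simp only [List.map_append, List.map_cons, List.map_map, List.map_nil]
  refine congrArg₂ _ (by norm_num) (congrArg₂ _ ?_ (by norm_num))
  apply List.map_congr_left
  intro i _
  simp only [Function.comp_apply]
  push_cast
  ring_nf

theorem pvMap_range_eq {α β : Type} (l : List α) (g : α → β) (F : Nat → β)
    (h : ∀ i, (hi : i < l.length) → F i = g l[i]) :
    (List.range l.length).map F = l.map g := by
  apply List.ext_getElem
  · simp
  · intro i h1 h2
    simp only [List.getElem_map, List.getElem_range]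
    exact h i (by simpa using h2)

theorem pvAt_zero {α : Type} (x : α) (t : List α) (d : α) : pvAt (x :: t) 0 d = x := by
  simp [pvAt]

theorem pvAt_natCast {α : Type} (l : List α) (i : Nat) (d : α) (h : i < l.length) :
    pvAt l (i : Int) d = l[i] := by
  simp [pvAt, PySem.List.pyGet?_natCast, List.getElem?_eq_getElem h]

theorem pvPlane_inner (p : List (List String)) (hp : p ≠ []) :
    (PySem.List.pyRange 0 ((p.length : Int) + 2) 1).map (fun y =>
      pvRowB (if decide (1 ≤ y ∧ y ≤ (p.length : Int)) = true then pvAt p (y - 1) [] else pvAt p 0 [])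
        (!decide (1 ≤ y ∧ y ≤ (p.length : Int))))
    = pvGrowXY_A p := by
  obtain ⟨r, t, rfl⟩ : ∃ r t, p = r :: t := by cases p with | nil => exact absurd rfl hp | cons r t => exact ⟨r, t, rfl⟩
  rw [pvRange_pad_map]
  simp only [pvGrowXY_A, List.map_cons, List.headD_cons]
  refine congrArg₂ _ ?_ (congrArg₂ _ ?_ ?_)
  · have : decide ((1:Int) ≤ 0 ∧ (0:Int) ≤ ((r::t).length : Int)) = false := by simp
    rw [this]
    simp only [Bool.false_eq_true, pvAt_zero, Bool.not_false]
    rw [pvRowB_true]; simp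
  · apply pvMap_range_eq
    intro i hi
    have h1 : decide ((1:Int) ≤ (i:Int) + 1 ∧ (i:Int) + 1 ≤ ((r::t).length : Int)) = true := by
      simp only [List.length_cons] at hi ⊢
      simp; omega
    rw [h1]
    simp only [add_sub_cancel_right, Bool.not_true]
    rw [pvAt_natCast _ _ _ hi]
    simp [pvRowB]
  · have : decide ((1:Int) ≤ ((r::t).length : Int) + 1 ∧ ((r::t).length : Int) + 1 ≤ ((r::t).length : Int)) = false := by
      simp
    rw [this]
    simp only [Bool.false_eq_true, pvAt_zero, Bool.not_false]
    rw [pvRowB_true]; simp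

theorem pvClean_rowB (r : List String) (d : Bool) :
    pvCleanRow_A (pvRowB r d) = pvRowB r true := by
  cases d
  · rw [show pvRowB r false = ["."] ++ r ++ ["."] from rfl, ← pvRowB_true]
  · rw [pvRowB_true, pvCleanRow_idem, ← pvRowB_true]

theorem pvPlane_border (p : List (List String)) (hp : p ≠ []) :
    (PySem.List.pyRange 0 ((p.length : Int) + 2) 1).map (fun y =>
      pvRowB (if decide (1 ≤ y ∧ y ≤ (p.length : Int)) = true then pvAt p (y - 1) [] else pvAt p 0 []) true)
    = (pvGrowXY_A p).map pvCleanRow_A := by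
  rw [← pvPlane_inner p hp, List.map_map]
  apply List.map_congr_left
  intro y _
  simp only [Function.comp_apply, pvClean_rowB]



theorem pvMcc (l : List (List String)) :
    List.map (pvCleanRow_A ∘ pvCleanRow_A) l = List.map pvCleanRow_A l := by
  apply List.map_congr_left
  intro r _
  simp only [Function.comp_apply, pvCleanRow_idem]

theorem pvCube_inner (v q : List (List (List String))) (p00 : List (List String))
    (h0 : p00 ≠ []) (hv : ∀ p ∈ v, p ≠ []) :
    List.map
      (fun z =>
        List.map
          (fun y =>
            pvRowB
              (if decide (1 ≤ y ∧ y ≤ ((if decide (1 ≤ z ∧ z ≤ (v.length : Int)) = true then pvAt v (z - 1) []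
                    else if decide (1 ≤ z ∧ z ≤ (v.length : Int)) = true then pvAt q (z - 1) [] else p00).length : Int)) = true then
                pvAt (if decide (1 ≤ z ∧ z ≤ (v.length : Int)) = true then pvAt v (z - 1) []
                    else if decide (1 ≤ z ∧ z ≤ (v.length : Int)) = true then pvAt q (z - 1) [] else p00) (y - 1) []
              else
                pvAt (if decide (1 ≤ z ∧ z ≤ (v.length : Int)) = true then pvAt v (z - 1) []
                    else if decide (1 ≤ z ∧ z ≤ (v.length : Int)) = true then pvAt q (z - 1) [] else p00) 0 [])
              (!(decide (1 ≤ z ∧ z ≤ (v.length : Int)) &&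
                  decide (1 ≤ y ∧ y ≤ ((if decide (1 ≤ z ∧ z ≤ (v.length : Int)) = true then pvAt v (z - 1) []
                    else if decide (1 ≤ z ∧ z ≤ (v.length : Int)) = true then pvAt q (z - 1) [] else p00).length : Int)))))
          (PySem.List.pyRange 0 (((if decide (1 ≤ z ∧ z ≤ (v.length : Int)) = true then pvAt v (z - 1) []
                    else if decide (1 ≤ z ∧ z ≤ (v.length : Int)) = true then pvAt q (z - 1) [] else p00).length : Int) + 2) 1))
      (PySem.List.pyRange 0 ((v.length : Int) + 2) 1)
    = List.map pvCleanRow_A (pvGrowXY_A p00) ::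
        (List.map pvGrowXY_A v ++ [List.map pvCleanRow_A (pvGrowXY_A p00)]) := by
  rw [show ((v.length : Int) + 2) = ((v.length : Nat) : Int) + 2 from rfl]
  rw [pvRange_pad_map]
  refine congrArg₂ _ ?_ (congrArg₂ _ ?_ ?_)
  · have hc : decide ((1:Int) ≤ 0 ∧ (0:Int) ≤ (v.length : Int)) = false := by simp
    simp only [hc, Bool.false_eq_true, if_false, Bool.false_and, Bool.not_false]
    exact pvPlane_border p00 h0
  · apply pvMap_range_eq
    intro i hi
    have h1 : decide ((1:Int) ≤ (i:Int) + 1 ∧ (i:Int) + 1 ≤ (v.length : Int)) = true := by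
      simp; omega
    simp only [h1, if_pos, Bool.true_and, add_sub_cancel_right]
    rw [pvAt_natCast _ _ _ hi]
    exact pvPlane_inner v[i] (hv _ (List.getElem_mem hi))
  · have hc : decide ((1:Int) ≤ (v.length : Int) + 1 ∧ (v.length : Int) + 1 ≤ (v.length : Int)) = false := by
      simp
    simp only [hc, Bool.false_eq_true, if_false, Bool.false_and, Bool.not_false]
    rw [pvPlane_border p00 h0]

theorem pvCube_border (p00 : List (List String)) (pt : List (List (List String)))
    (hq : ∀ p ∈ p00 :: pt, p ≠ []) :
    List.map
      (fun z =>
        List.map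
          (fun y =>
            pvRowB
              (if decide (1 ≤ y ∧ y ≤ ((if decide (1 ≤ z ∧ z ≤ (((p00 :: pt).length : Nat) : Int)) = true then pvAt (p00 :: pt) (z - 1) [] else p00).length : Int)) = true then
                pvAt (if decide (1 ≤ z ∧ z ≤ (((p00 :: pt).length : Nat) : Int)) = true then pvAt (p00 :: pt) (z - 1) [] else p00) (y - 1) []
              else
                pvAt (if decide (1 ≤ z ∧ z ≤ (((p00 :: pt).length : Nat) : Int)) = true then pvAt (p00 :: pt) (z - 1) [] else p00) 0 [])
              true)
          (PySem.List.pyRange 0 (((if decide (1 ≤ z ∧ z ≤ (((p00 :: pt).length : Nat) : Int)) = true then pvAt (p00 :: pt) (z - 1) [] else p00).length : Int) + 2) 1))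
      (PySem.List.pyRange 0 ((((p00 :: pt).length : Nat) : Int) + 2) 1)
    = List.map (fun z => List.map pvCleanRow_A z)
        (List.map pvCleanRow_A (pvGrowXY_A p00) :: pvGrowXY_A p00 :: List.map pvGrowXY_A pt ++
          [List.map pvCleanRow_A (pvGrowXY_A p00)]) := by
  have h0 : p00 ≠ [] := hq _ (List.mem_cons_self)
  rw [pvRange_pad_map]
  rw [pvMap_range_eq (p00 :: pt) (fun p => List.map pvCleanRow_A (pvGrowXY_A p)) _ ?h]
  case h =>
    intro i hi
    have h1 : decide ((1:Int) ≤ (i:Int) + 1 ∧ (i:Int) + 1 ≤ (((p00 :: pt).length : Nat) : Int)) = true := by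
      simp only [List.length_cons] at hi ⊢; simp; omega
    simp only [h1, if_pos, add_sub_cancel_right]
    rw [pvAt_natCast _ _ _ hi]
    exact pvPlane_border _ (hq _ (List.getElem_mem hi))
  simp only [List.map_cons, List.map_append, List.map_map, List.cons_append]
  refine congrArg₂ _ ?_ (congrArg₂ _ rfl (congrArg₂ _ ?_ ?_))
  · have hc : decide ((1:Int) ≤ 0 ∧ (0:Int) ≤ (((p00 :: pt).length : Nat) : Int)) = false := by simp
    simp only [hc, Bool.false_eq_true, if_false]
    rw [pvPlane_border p00 h0, pvMcc]
  · apply List.map_congr_left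
    intro p _
    simp only [Function.comp_apply]
  · have hc : decide ((1:Int) ≤ (((p00 :: pt).length : Nat) : Int) + 1 ∧ (((p00 :: pt).length : Nat) : Int) + 1 ≤ (((p00 :: pt).length : Nat) : Int)) = false := by
      simp
    simp only [hc, Bool.false_eq_true, if_false]
    rw [pvPlane_border p00 h0, pvMcc]
    simp

theorem grow_hyper_matrix_spec : Claim_equal_grow_hyper_matrix := by
  intro matrix _ hpre
  obtain ⟨hne, hh, hall⟩ := hpre
  match matrix, hne, hall with
  | (p00 :: pt) :: mt, _, hall =>
    have hw : ∀ w ∈ (p00 :: pt) :: mt, ∀ p ∈ w, p ≠ [] := by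
      intro w hwm p hpm
      have := List.all_eq_true.mp hall w hwm
      have := List.all_eq_true.mp this p hpm
      simpa using this
    have h0 : p00 ≠ [] := hw _ List.mem_cons_self _ List.mem_cons_self
    show grow_hyper_matrix _ = grow_hyper_matrix_alt _
    simp only [grow_hyper_matrix, grow_hyper_matrix_alt]
    rw [show ((((p00 :: pt) :: mt).length : Int) + 2) = ((((p00 :: pt) :: mt).length : Nat) : Int) + 2 from rfl]
    rw [pvRange_pad_map]
    simp only [List.map_cons, List.headD_cons, pvAt_zero]
    have hz : decide ((1:Int) ≤ 0 ∧ (0:Int) ≤ ((((p00 :: pt) :: mt).length : Nat) : Int)) = false := by simp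
    simp only [hz, Bool.false_and, Bool.false_eq_true, if_false, Bool.not_false]
    rw [pvMap_range_eq ((p00 :: pt) :: mt)
        (fun w => List.map pvCleanRow_A (pvGrowXY_A p00) :: (List.map pvGrowXY_A w ++ [List.map pvCleanRow_A (pvGrowXY_A p00)])) _ ?felem]
    case felem =>
      intro i hi
      have h1 : decide ((1:Int) ≤ (i:Int) + 1 ∧ (i:Int) + 1 ≤ ((((p00 :: pt) :: mt).length : Nat) : Int)) = true := by
        simp only [List.length_cons] at hi ⊢; simp; omega
      simp only [h1, if_pos, Bool.true_and, add_sub_cancel_right]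
      rw [pvAt_natCast _ _ _ hi]
      exact pvCube_inner _ _ p00 h0 (hw _ (List.getElem_mem hi))
    have hL : decide ((1:Int) ≤ ((((p00 :: pt) :: mt).length : Nat) : Int) + 1 ∧ ((((p00 :: pt) :: mt).length : Nat) : Int) + 1 ≤ ((((p00 :: pt) :: mt).length : Nat) : Int)) = false := by
      simp
    simp only [hL, Bool.false_and, Bool.false_eq_true, if_false, Bool.not_false]
    rw [pvCube_border p00 pt (hw _ List.mem_cons_self)]
    simp only [List.map_cons, List.cons_append, List.map_map]
    rfl
  | [] :: mt, _, _ => simp at hh
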